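-- pv_equiv track=rewrite | github.com/digicoop/postgres-proto | postgres_proto/sql/tokenizer.py | find_next_delimiter
-- ===== SOURCE A (Python) =====
-- def find_next_delimiter(string, pos, delimiters):
--     next_delim = None
--     next_delim_pos = len(string)
--     string = string.lower()
--     for delim in delimiters:
--         delim_pos = string.find(delim.lower(), pos)
--         if delim_pos >= 0 and delim_pos < next_delim_pos:
--             next_delim = delim
--             next_delim_pos = delim_pos
--     return next_delim, next_delim_pos
-- ===== SOURCE B (Python) =====
-- def find_next_delimiter(string, pos, delimiters):
--     # Single left-to-right scan over positions, returning at the first match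
--     # (earliest position; ties broken by delimiter list order), instead of one
--     # string.find pass per delimiter.
--     n = len(string)
--     lowered = string.lower()
--     pairs = [(d, d.lower()) for d in delimiters]
--     start = pos if pos >= 0 else max(n + pos, 0)
--     for i in range(start, n):
--         for d, dl in pairs:
--             if lowered[i:i + len(dl)] == dl:
--                 return d, i
--     return None, n
-- ===== Notes on version B (the rewrite author's own statement) =====
-- stated objective: faster
-- what changed: B replaces A's per-delimiter string.find passes (then running min) by a single left-to-right scan over positions that returns at the first position where any delimiter matches, ties broken by list order.
import Mathlib
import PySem

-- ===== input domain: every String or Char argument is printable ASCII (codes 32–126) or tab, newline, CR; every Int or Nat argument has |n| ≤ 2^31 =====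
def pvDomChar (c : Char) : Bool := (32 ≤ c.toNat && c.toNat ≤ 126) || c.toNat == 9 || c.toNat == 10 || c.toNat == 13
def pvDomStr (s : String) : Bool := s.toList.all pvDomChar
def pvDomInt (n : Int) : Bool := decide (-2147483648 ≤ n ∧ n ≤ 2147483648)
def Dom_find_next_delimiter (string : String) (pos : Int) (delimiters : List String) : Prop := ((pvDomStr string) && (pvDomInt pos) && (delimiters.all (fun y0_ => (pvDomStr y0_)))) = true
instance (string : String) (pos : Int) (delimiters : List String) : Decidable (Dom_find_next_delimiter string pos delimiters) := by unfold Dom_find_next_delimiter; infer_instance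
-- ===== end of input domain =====

-- B replaces A's per-delimiter string.find passes by a single left-to-right scan
-- over positions that returns at the first match (alternative algorithm, same result).


-- ===== PORT A =====
-- literal transliteration of A: for each delimiter, string.find(delim.lower(), pos)
-- on the lowered string; keep it if nonnegative and strictly below the best so far.
def find_next_delimiter (string : String) (pos : Int) (delimiters : List String) : Option String × Int :=
  let init : Option String × Int := (none, (PySem.Str.len string : Int))
  let s := PySem.Str.lower string
  delimiters.foldl
    (fun acc delim =>
      let delim_pos := PySem.Str.findFrom s (PySem.Str.lower delim) pos none
      if 0 ≤ delim_pos ∧ delim_pos < acc.2 then (some delim, delim_pos) else acc)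
    init

-- ===== PORT B =====
-- inner loop of Source B: first (d, dl) pair whose lowered form dl occurs at position i,
-- i.e. lowered[i:i+len(dl)] == dl (both slice bounds are nonnegative Nats, so the
-- Python slice is exactly (drop i).take dl.length).
def fndScan (lowered : List Char) (i : Nat) : List (String × List Char) → Option String
  | [] => none
  | (d, dl) :: rest =>
      if (lowered.drop i).take dl.length = dl then some d else fndScan lowered i rest

-- outer loop of Source B: positions i in range(start, n); return at the first hit.
def fndLoop (lowered : List Char) (pairs : List (String × List Char)) (n : Nat) :
    List Nat → Option String × Int
  | [] => (none, (n : Int))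
  | i :: rest =>
      match fndScan lowered i pairs with
      | some d => (some d, (i : Int))
      | none => fndLoop lowered pairs n rest

def find_next_delimiter_alt (string : String) (pos : Int) (delimiters : List String) :
    Option String × Int :=
  let n := string.toList.length
  let lowered := PySem.Chars.lower string.toList
  let pairs := delimiters.map (fun d => (d, PySem.Chars.lower d.toList))
  -- start = pos if pos >= 0 else max(n + pos, 0)  (Int.toNat clamps at 0)
  let start : Nat := if pos < 0 then (pos + n).toNat else pos.toNat
  -- range(start, n)  (empty when start ≥ n, like Python's range)
  fndLoop lowered pairs n (List.range' start (n - start))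

-- ===== PRECONDITION & SPEC =====
def Spec_find_next_delimiter (string : String) (pos : Int) (delimiters : List String) (out : Option String × Int) : Prop := out = find_next_delimiter_alt string pos delimiters
instance (string : String) (pos : Int) (delimiters : List String) (out : Option String × Int) : Decidable (Spec_find_next_delimiter string pos delimiters out) := by unfold Spec_find_next_delimiter; infer_instance

-- ===== CLAIM (what is proved, stated in full; the proofs are below) =====
def Claim_equal_find_next_delimiter : Prop := ∀ (string : String) (pos : Int) (delimiters : List String), Dom_find_next_delimiter string pos delimiters → Spec_find_next_delimiter string pos delimiters (find_next_delimiter string pos delimiters)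

-- ===== LEMMAS AND PROOFS =====

-- the clamped Nat start position (Python's slice-bound normalisation of `pos`)
def fndStart (n : Nat) (pos : Int) : Nat := if pos < 0 then (pos + n).toNat else pos.toNat

-- unfolding of PySem.Chars.findFrom with end? = none
theorem findFrom_raw (s sub : List Char) (pos : Int) :
    PySem.Chars.findFrom s sub pos none =
      (let st : Int := if pos < 0 then (if pos + s.length < 0 then 0 else pos + s.length) else pos
       if (s.length : Int) < st then -1
       else if PySem.Chars.find (s.drop st.toNat) sub = -1 then -1
       else st + PySem.Chars.find (s.drop st.toNat) sub) := by
  simp only [PySem.Chars.findFrom, Int.toNat_natCast, List.take_length]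

-- findFrom with an arbitrary Int start equals findFrom with the clamped Nat start,
-- except that a clamped start past the end yields -1.
theorem findFrom_clamp (s sub : List Char) (pos : Int) :
    PySem.Chars.findFrom s sub pos none =
      if fndStart s.length pos ≤ s.length
      then PySem.Chars.findFrom s sub (fndStart s.length pos) none
      else -1 := by
  rw [findFrom_raw]
  by_cases hle : fndStart s.length pos ≤ s.length
  · rw [if_pos hle, PySem.Chars.findFrom_natCast s sub _ hle]
    have hst : (if pos < 0 then (if pos + (s.length:Int) < 0 then 0 else pos + s.length) else pos)
        = (fndStart s.length pos : Int) := by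
      simp only [fndStart]; split_ifs <;> omega
    simp only [hst, Int.toNat_natCast]
    rw [if_neg (by omega)]
  · rw [if_neg hle]
    have hlt : (s.length : Int) <
        (if pos < 0 then (if pos + (s.length:Int) < 0 then 0 else pos + s.length) else pos) := by
      simp only [fndStart] at hle; split_ifs at hle ⊢ <;> omega
    simp only [if_pos hlt]

-- a negative findFrom from a valid Nat start means: no occurrence at any j ≥ start
theorem ff_neg (s sub : List Char) (k : Nat) (hk : k ≤ s.length)
    (h : PySem.Chars.findFrom s sub (k : Int) none < 0) :
    ∀ j, k ≤ j → ¬ sub <+: s.drop j := by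
  have h1 : PySem.Chars.findFrom s sub (k : Int) none = -1 := by
    rw [PySem.Chars.findFrom_natCast s sub k hk] at h ⊢
    split_ifs with hf
    · rfl
    · exfalso
      have := PySem.Chars.neg_one_le_find (s.drop k) sub
      rw [if_neg hf] at h
      omega
  have h2 : ¬ sub <:+: s.drop k := by
    rwa [PySem.Chars.findFrom_natCast_eq_neg_one_iff s sub k hk] at h1
  intro j hj hpre
  apply h2
  have : (∃ j', sub <+: (s.drop k).drop j') :=
    ⟨j - k, by rw [List.drop_drop, show k + (j - k) = j by omega]; exact hpre⟩
  rw [PySem.Chars.exists_prefix_drop_iff_isIn] at this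
  rwa [PySem.Chars.isIn_iff_infix] at this

-- a nonnegative findFrom from a valid Nat start points at the first occurrence ≥ start
theorem ff_pos (s sub : List Char) (k : Nat) (hk : k ≤ s.length)
    (h : 0 ≤ PySem.Chars.findFrom s sub (k : Int) none) :
    PySem.Chars.findFrom s sub (k : Int) none
        = ((PySem.Chars.findFrom s sub (k : Int) none).toNat : Int) ∧
    k ≤ (PySem.Chars.findFrom s sub (k : Int) none).toNat ∧
    (PySem.Chars.findFrom s sub (k : Int) none).toNat ≤ s.length ∧
    sub <+: s.drop (PySem.Chars.findFrom s sub (k : Int) none).toNat ∧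
    ∀ i, k ≤ i → i < (PySem.Chars.findFrom s sub (k : Int) none).toNat → ¬ sub <+: s.drop i := by
  have hne : PySem.Chars.findFrom s sub (k : Int) none ≠ -1 := by omega
  obtain ⟨h1, h2, h3⟩ := PySem.Chars.findFrom_natCast_spec s sub k hk hne
  refine ⟨by omega, by omega, ?_, h2, h3⟩
  rw [PySem.Chars.findFrom_natCast s sub k hk] at h ⊢
  split_ifs at h ⊢ with hf
  · omega
  · have := PySem.Chars.find_le_length (s.drop k) sub
    rw [List.length_drop] at this
    omega

-- bridge between Source B's slice test and List.IsPrefix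
theorem take_eq_iff_prefix (L sub : List Char) (i : Nat) :
    (L.drop i).take sub.length = sub ↔ sub <+: L.drop i := by
  rw [List.prefix_iff_eq_take, eq_comm]

-- first hit in [i, i+k): first position with a matching pair, with the first
-- matching pair's string
def firstHit (lowered : List Char) (pairs : List (String × List Char)) :
    Nat → Nat → Option (String × Nat)
  | _, 0 => none
  | i, k + 1 =>
      match fndScan lowered i pairs with
      | some d => some (d, i)
      | none => firstHit lowered pairs (i + 1) k

theorem firstHit_nil (L : List Char) (i k : Nat) : firstHit L [] i k = none := by
  induction k generalizing i with
  | zero => rfl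
  | succ k ih => simpa [firstHit, fndScan] using ih (i + 1)

theorem fndLoop_eq_firstHit (L : List Char) (pairs : List (String × List Char)) (n i k : Nat) :
    fndLoop L pairs n (List.range' i k) =
      match firstHit L pairs i k with
      | none => (none, (n : Int))
      | some (d, j) => (some d, (j : Int)) := by
  induction k generalizing i with
  | zero => simp [fndLoop, firstHit]
  | succ k ih =>
    rw [List.range'_succ]
    simp only [fndLoop, firstHit]
    cases fndScan L i pairs with
    | none => simpa using ih (i + 1)
    | some d => rfl

theorem firstHit_append (L : List Char) (pairs : List (String × List Char)) (i a b : Nat) :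
    firstHit L pairs i (a + b) =
      ((firstHit L pairs i a).or (firstHit L pairs (i + a) b)) := by
  induction a generalizing i with
  | zero => simp [firstHit]
  | succ a ih =>
    rw [show i + (a + 1) = (i + 1) + a by omega]
    rw [show a + 1 + b = (a + b) + 1 by omega]
    simp only [firstHit]
    cases fndScan L i pairs with
    | none => simpa using ih (i + 1)
    | some d => rfl

theorem firstHit_cons_of_no_match (L : List Char) (p : String × List Char)
    (pairs : List (String × List Char)) (i k : Nat)
    (h : ∀ j, i ≤ j → j < i + k → ¬ ((L.drop j).take p.2.length = p.2)) :
    firstHit L (p :: pairs) i k = firstHit L pairs i k := by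
  induction k generalizing i with
  | zero => rfl
  | succ k ih =>
    simp only [firstHit, fndScan]
    rw [if_neg (h i (le_refl i) (by omega))]
    cases hs : fndScan L i pairs with
    | none => simp [ih (i + 1) (fun j hj1 hj2 => h j (by omega) (by omega))]
    | some d => rfl

-- A's fold, with a valid Nat start, returns the first hit in [st, accp) if there is
-- one, and the accumulator unchanged otherwise.
theorem foldA_eq_firstHit (L : List Char) (st : Nat)
    (pairs : List (String × List Char)) (accd : Option String) (accp : Nat)
    (hst : st ≤ accp) (hn : accp ≤ L.length) :
    List.foldl
      (fun (acc : Option String × Int) (p : String × List Char) =>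
        let dp := PySem.Chars.findFrom L p.2 (st : Int) none
        if 0 ≤ dp ∧ dp < acc.2 then (some p.1, dp) else acc)
      (accd, (accp : Int)) pairs =
      match firstHit L pairs st (accp - st) with
      | none => (accd, (accp : Int))
      | some (d, j) => (some d, (j : Int)) := by
  induction pairs generalizing accd accp with
  | nil => simp [firstHit_nil]
  | cons p rest ih =>
    rw [List.foldl_cons]
    by_cases hc : 0 ≤ PySem.Chars.findFrom L p.2 (st : Int) none ∧
        PySem.Chars.findFrom L p.2 (st : Int) none < ((accp : Nat) : Int)
    · obtain ⟨hf0, hflt⟩ := hc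
      obtain ⟨heq, hk1, hk2, hpre, hmin⟩ := ff_pos L p.2 st (le_trans hst hn) hf0
      set j := (PySem.Chars.findFrom L p.2 (st : Int) none).toNat with hj
      have hjlt : j < accp := by omega
      have hstep :
          (if 0 ≤ PySem.Chars.findFrom L p.2 (st : Int) none ∧
              PySem.Chars.findFrom L p.2 (st : Int) none < ((accd, ((accp : Nat) : Int)) : Option String × Int).2
           then (some p.1, PySem.Chars.findFrom L p.2 (st : Int) none)
           else (accd, ((accp : Nat) : Int))) = (some p.1, (j : Int)) := by
        rw [if_pos ⟨hf0, hflt⟩, heq]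
      simp only [hstep]
      rw [ih (some p.1) j hk1 hk2]
      have hnm : ∀ i, st ≤ i → i < st + (j - st) → ¬ ((L.drop i).take p.2.length = p.2) := by
        intro i hi1 hi2
        rw [take_eq_iff_prefix]
        exact hmin i hi1 (by omega)
      rw [show accp - st = (j - st) + (accp - j) by omega,
          firstHit_append, firstHit_cons_of_no_match L p rest st (j - st) hnm,
          show st + (j - st) = j by omega,
          show accp - j = (accp - j - 1) + 1 by omega]
      simp only [firstHit]
      have hscan : fndScan L j (p :: rest) = some p.1 := by
        obtain ⟨d, dl⟩ := p
        simp only [fndScan]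
        rw [if_pos ((take_eq_iff_prefix L dl j).mpr hpre)]
      rw [hscan]
      cases firstHit L rest st (j - st) with
      | none => simp [Option.or]
      | some x => simp [Option.or]
    · have hstep :
          (if 0 ≤ PySem.Chars.findFrom L p.2 (st : Int) none ∧
              PySem.Chars.findFrom L p.2 (st : Int) none < ((accd, ((accp : Nat) : Int)) : Option String × Int).2
           then (some p.1, PySem.Chars.findFrom L p.2 (st : Int) none)
           else (accd, ((accp : Nat) : Int))) = (accd, ((accp : Nat) : Int)) := by
        rw [if_neg hc]
      simp only [hstep]
      rw [ih accd accp hst hn]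
      have hnm : ∀ i, st ≤ i → i < st + (accp - st) → ¬ ((L.drop i).take p.2.length = p.2) := by
        intro i hi1 hi2
        rw [take_eq_iff_prefix]
        rcases lt_or_ge (PySem.Chars.findFrom L p.2 (st : Int) none) 0 with hneg | hpos
        · exact ff_neg L p.2 st (le_trans hst hn) hneg i hi1
        · obtain ⟨heq, hk1, hk2, hpre, hmin⟩ := ff_pos L p.2 st (le_trans hst hn) hpos
          have : ((accp : Nat) : Int) ≤ PySem.Chars.findFrom L p.2 (st : Int) none := by
            by_contra hlt
            exact hc ⟨hpos, by omega⟩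
          exact hmin i hi1 (by omega)
      rw [firstHit_cons_of_no_match L p rest st (accp - st) hnm]

-- rewrite A's fold over delimiters as the same fold over (delimiter, lowered) pairs
theorem fold_over_map (L : List Char) (pos : Int) (init : Option String × Int)
    (ds : List String) :
    ds.foldl
      (fun (acc : Option String × Int) delim =>
        let dp := PySem.Chars.findFrom L (PySem.Chars.lower delim.toList) pos none
        if 0 ≤ dp ∧ dp < acc.2 then (some delim, dp) else acc) init
    = (ds.map (fun d => (d, PySem.Chars.lower d.toList))).foldl
      (fun (acc : Option String × Int) (p : String × List Char) =>
        let dp := PySem.Chars.findFrom L p.2 pos none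
        if 0 ≤ dp ∧ dp < acc.2 then (some p.1, dp) else acc) init := by
  induction ds generalizing init with
  | nil => rfl
  | cons d rest ih => simp only [List.foldl_cons, List.map_cons]; exact ih _

theorem foldl_id {α β : Type} (f : α → β → α) (h : ∀ a b, f a b = a) :
    ∀ (l : List β) (a : α), l.foldl f a = a := by
  intro l
  induction l with
  | nil => intro a; rfl
  | cons x xs ih => intro a; rw [List.foldl_cons, h]; exact ih a

-- ===== VERDICT (by name: the statement is the Claim_ definition above) =====
theorem find_next_delimiter_spec : Claim_equal_find_next_delimiter := by
  intro string pos delimiters _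
  unfold Spec_find_next_delimiter
  unfold find_next_delimiter find_next_delimiter_alt
  simp only [PySem.Str.findFrom_eq, PySem.Str.toList_lower, PySem.Str.len_eq]
  set L := PySem.Chars.lower string.toList with hLdef
  have hL : L.length = string.toList.length := by
    rw [hLdef]; simp [PySem.Chars.lower]
  set n := string.toList.length with hndef
  have hstart : (if pos < 0 then (pos + (n : Int)).toNat else pos.toNat) = fndStart n pos := by
    simp [fndStart]
  rw [fold_over_map, hstart, fndLoop_eq_firstHit]
  by_cases hle : fndStart n pos ≤ n
  · have hrw : ∀ sub, PySem.Chars.findFrom L sub pos none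
        = PySem.Chars.findFrom L sub ((fndStart n pos : Nat) : Int) none := by
      intro sub
      rw [findFrom_clamp, hL, if_pos hle]
    simp only [hrw]
    rw [foldA_eq_firstHit L (fndStart n pos) _ none n hle (by omega)]
  · have hrw : ∀ sub, PySem.Chars.findFrom L sub pos none = (-1 : Int) := by
      intro sub
      rw [findFrom_clamp, hL, if_neg hle]
    simp only [hrw]
    rw [foldl_id _ (by intro a b; simp)]
    rw [show n - fndStart n pos = 0 by omega]
    rfl
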